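-- pv_equiv track=rewrite | github.com/val3rkq/trace-riscv-excel-gen | parser.py | replace_char_inside_braces
-- ===== SOURCE A (Python) =====
-- def replace_char_inside_braces(text: str, replacing_char: str, replaced_char: str) -> str:
--     depth: int = 0
--     result = []
--     for char in text:
--         if char == "{":
--             depth += 1
--         elif char == "}":
--             depth -= 1
--         if depth > 0 and char == replacing_char:
--             result.append(replaced_char)
--         else:
--             result.append(char)
--     return "".join(result)
-- ===== SOURCE B (Python) =====
-- def _prefix_depths(text):
--     """Running brace depth AFTER each character of text."""
--     total = 0
--     depths = []
--     for c in text: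
--         if c == "{":
--             total += 1
--         elif c == "}":
--             total -= 1
--         depths.append(total)
--     return depths
--
--
-- def replace_char_inside_braces(text: str, replacing_char: str, replaced_char: str) -> str:
--     depths = _prefix_depths(text)
--     return "".join(
--         replaced_char if d > 0 and c == replacing_char else c
--         for c, d in zip(text, depths)
--     )
-- ===== Notes on version B (the rewrite author's own statement) =====
-- stated objective: alternative
-- what changed: A's single interleaved loop (depth update + conditional emission in one pass) is split into a prefix-depth table pass followed by a zip-based emission pass.
import Mathlib
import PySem

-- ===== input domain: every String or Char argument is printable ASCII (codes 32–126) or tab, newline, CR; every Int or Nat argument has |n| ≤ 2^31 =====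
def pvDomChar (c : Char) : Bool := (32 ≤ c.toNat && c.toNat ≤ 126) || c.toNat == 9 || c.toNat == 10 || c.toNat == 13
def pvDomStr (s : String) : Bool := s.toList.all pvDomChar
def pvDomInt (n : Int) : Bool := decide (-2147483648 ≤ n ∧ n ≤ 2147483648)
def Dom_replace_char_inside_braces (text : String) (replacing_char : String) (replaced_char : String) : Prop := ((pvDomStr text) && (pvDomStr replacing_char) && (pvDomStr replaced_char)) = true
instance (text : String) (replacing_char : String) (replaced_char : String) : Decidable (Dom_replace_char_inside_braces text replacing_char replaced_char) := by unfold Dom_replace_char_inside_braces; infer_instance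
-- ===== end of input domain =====

-- B splits A's single interleaved loop into a prefix-depth table pass plus a zip-based emission pass (objective: alternative decomposition, same behaviour).

-- ===== PORT A =====
-- the single loop: update depth, then conditionally emit replaced_char (as a string) or the char
def replace_char_inside_braces (text : String) (replacing_char : String) (replaced_char : String) : String :=
  String.mk ((text.toList.foldl (fun (st : Int × List Char) c =>
      let d : Int := if c = '{' then st.1 + 1 else if c = '}' then st.1 - 1 else st.1
      (d, st.2 ++ (if 0 < d ∧ String.mk [c] = replacing_char then replaced_char.toList else [c])))
    ((0 : Int), ([] : List Char))).2)

-- ===== PORT B =====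
-- pass 1: running brace depth AFTER each character (Source B's _prefix_depths)
def pvPrefixDepths (cs : List Char) : List Int :=
  (cs.foldl (fun (st : Int × List Int) c =>
      let t : Int := if c = '{' then st.1 + 1 else if c = '}' then st.1 - 1 else st.1
      (t, st.2 ++ [t]))
    ((0 : Int), ([] : List Int))).2

-- pass 2: zip text with its depth table and emit
def replace_char_inside_braces_alt (text : String) (replacing_char : String) (replaced_char : String) : String :=
  String.mk ((text.toList.zip (pvPrefixDepths text.toList)).flatMap
    (fun p => if 0 < p.2 ∧ String.mk [p.1] = replacing_char then replaced_char.toList else [p.1]))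

-- ===== PRECONDITION & SPEC =====
def Spec_replace_char_inside_braces (text : String) (replacing_char : String) (replaced_char : String) (out : String) : Prop := out = replace_char_inside_braces_alt text replacing_char replaced_char
instance (text : String) (replacing_char : String) (replaced_char : String) (out : String) : Decidable (Spec_replace_char_inside_braces text replacing_char replaced_char out) := by unfold Spec_replace_char_inside_braces; infer_instance

-- ===== CLAIM (what is proved, stated in full; the proofs are below) =====
def Claim_equal_replace_char_inside_braces : Prop := ∀ (text : String) (replacing_char : String) (replaced_char : String), Dom_replace_char_inside_braces text replacing_char replaced_char → Spec_replace_char_inside_braces text replacing_char replaced_char (replace_char_inside_braces text replacing_char replaced_char)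

-- ===== LEMMAS AND PROOFS =====

-- common recursive characterisation of the emitted character list, starting at depth d
def pvGo (rc rp : String) : List Char → Int → List Char
  | [], _ => []
  | c :: cs, d =>
    let d' : Int := if c = '{' then d + 1 else if c = '}' then d - 1 else d
    (if 0 < d' ∧ String.mk [c] = rc then rp.toList else [c]) ++ pvGo rc rp cs d'

-- recursive characterisation of the prefix-depth table starting from total t
def pvSums : List Char → Int → List Int
  | [], _ => []
  | c :: cs, t =>
    let t' : Int := if c = '{' then t + 1 else if c = '}' then t - 1 else t
    t' :: pvSums cs t'

theorem pvFoldA_eq (rc rp : String) (cs : List Char) : ∀ (d : Int) (acc : List Char),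
    (cs.foldl (fun (st : Int × List Char) c =>
        let d : Int := if c = '{' then st.1 + 1 else if c = '}' then st.1 - 1 else st.1
        (d, st.2 ++ (if 0 < d ∧ String.mk [c] = rc then rp.toList else [c]))) (d, acc)).2
      = acc ++ pvGo rc rp cs d := by
  induction cs with
  | nil => intro d acc; simp [pvGo]
  | cons c cs ih => intro d acc; simp [pvGo, ih, List.append_assoc]

theorem pvFoldP_eq (cs : List Char) : ∀ (t : Int) (out : List Int),
    (cs.foldl (fun (st : Int × List Int) c =>
        let t : Int := if c = '{' then st.1 + 1 else if c = '}' then st.1 - 1 else st.1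
        (t, st.2 ++ [t])) (t, out)).2
      = out ++ pvSums cs t := by
  induction cs with
  | nil => intro t out; simp [pvSums]
  | cons c cs ih => intro t out; simp [pvSums, ih, List.append_assoc]

theorem pvZip_eq (rc rp : String) (cs : List Char) : ∀ (d : Int),
    (cs.zip (pvSums cs d)).flatMap
        (fun p => if 0 < p.2 ∧ String.mk [p.1] = rc then rp.toList else [p.1])
      = pvGo rc rp cs d := by
  induction cs with
  | nil => intro d; simp [pvSums, pvGo]
  | cons c cs ih => intro d; simp [pvSums, pvGo, ih]

-- ===== VERDICT (by name: the statement is the Claim_ definition above) =====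
theorem replace_char_inside_braces_spec : Claim_equal_replace_char_inside_braces := by
  intro text rc rp _
  unfold Spec_replace_char_inside_braces replace_char_inside_braces replace_char_inside_braces_alt pvPrefixDepths
  rw [pvFoldA_eq, pvFoldP_eq]
  simp only [List.nil_append]
  rw [pvZip_eq]
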